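-- pv_equiv track=rewrite | github.com/almienne81/pipewatch | pipewatch/healthcheck.py | _consecutive_failures
-- ===== SOURCE A (Python) =====
-- def _consecutive_failures(outcomes: list[bool]) -> int:
--     """Count trailing consecutive False values in *outcomes*."""
--     count = 0
--     for outcome in reversed(outcomes):
--         if not outcome:
--             count += 1
--         else:
--             break
--     return count
-- ===== SOURCE B (Python) =====
-- def _consecutive_failures(outcomes: list[bool]) -> int:
--     """Count trailing consecutive False values in *outcomes*."""
--     count = 0
--     for outcome in outcomes:
--         if outcome:
--             count = 0
--         else:
--             count += 1
--     return count
-- ===== Notes on version B (the rewrite author's own statement) =====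
-- stated objective: alternative
-- what changed: Replaced the reverse iteration with early break by a single forward pass keeping a running counter that resets to 0 on each True; the counter surviving to the end is the trailing False-run length.
import Mathlib
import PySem

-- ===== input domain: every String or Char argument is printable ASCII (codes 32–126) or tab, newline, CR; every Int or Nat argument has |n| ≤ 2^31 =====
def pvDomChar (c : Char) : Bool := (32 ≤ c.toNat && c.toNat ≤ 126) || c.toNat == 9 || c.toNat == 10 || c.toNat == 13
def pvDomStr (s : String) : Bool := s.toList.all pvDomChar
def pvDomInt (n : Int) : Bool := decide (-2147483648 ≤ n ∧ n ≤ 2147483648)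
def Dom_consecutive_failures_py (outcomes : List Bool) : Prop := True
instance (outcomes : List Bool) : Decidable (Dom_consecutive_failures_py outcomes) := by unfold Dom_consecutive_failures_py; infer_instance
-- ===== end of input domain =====

-- B replaces A's reverse iteration with an early break by one forward pass whose counter resets on True (alternative decomposition; same cost).

-- ===== PORT A =====
-- A's loop over reversed(outcomes) with break: recursion on the reversed list,
-- stopping (returning the accumulated count) at the first True.
def pvALoop (l : List Bool) (count : Int) : Int :=
  match l with
  | [] => count
  | o :: rest => if !o then pvALoop rest (count + 1) else count

def consecutive_failures_py (outcomes : List Bool) : Int :=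
  pvALoop outcomes.reverse 0

-- ===== PORT B =====
-- forward fold: reset to 0 on True, increment on False
def consecutive_failures_py_alt (outcomes : List Bool) : Int :=
  outcomes.foldl (fun count outcome => if outcome then 0 else count + 1) 0

-- ===== PRECONDITION & SPEC =====
def Spec_consecutive_failures_py (outcomes : List Bool) (out : Int) : Prop := out = consecutive_failures_py_alt outcomes
instance (outcomes : List Bool) (out : Int) : Decidable (Spec_consecutive_failures_py outcomes out) := by unfold Spec_consecutive_failures_py; infer_instance

-- ===== CLAIM (what is proved, stated in full; the proofs are below) =====
def Claim_equal_consecutive_failures_py : Prop := ∀ (outcomes : List Bool), Dom_consecutive_failures_py outcomes → Spec_consecutive_failures_py outcomes (consecutive_failures_py outcomes)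

-- ===== LEMMAS AND PROOFS =====

-- pvALoop with any accumulator: result = accumulator + result from 0
theorem pvALoop_acc (l : List Bool) (c : Int) : pvALoop l c = c + pvALoop l 0 := by
  induction l generalizing c with
  | nil => simp [pvALoop]
  | cons o rest ih =>
    cases o <;> simp [pvALoop]
    rw [ih (c + 1), ih 1]
    ring

theorem pvFold_snoc (l : List Bool) (o : Bool) (c : Int) :
    List.foldl (fun count outcome => if outcome then 0 else count + 1) c (l ++ [o]) =
      if o then 0 else List.foldl (fun count outcome => if outcome then 0 else count + 1) c l + 1 := by
  simp [List.foldl_append]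

theorem pvMain (l : List Bool) :
    consecutive_failures_py_alt l = pvALoop l.reverse 0 := by
  induction l using List.reverseRecOn with
  | nil => simp [consecutive_failures_py_alt, pvALoop]
  | append_singleton l o ih =>
    unfold consecutive_failures_py_alt at *
    rw [pvFold_snoc, List.reverse_append]
    cases o <;> simp [pvALoop]
    · rw [pvALoop_acc, ih]; ring

-- ===== VERDICT (by name: the statement is the Claim_ definition above) =====
theorem consecutive_failures_py_spec : Claim_equal_consecutive_failures_py := by
  intro outcomes _
  unfold Spec_consecutive_failures_py consecutive_failures_py
  exact (pvMain outcomes).symm
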